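-- pv_equiv track=rewrite | github.com/all-of-us/curation | data_steward/analytics/tools/email-generator.py | print_error_info
-- ===== SOURCE A (Python) =====
-- def print_error_info(error_dict, starting_msg, percent):
--     """
--     Function is used to create a string to display the error
--     information for each of the tables belonging to a particular sheet.
--     :param
--     err_dictionary (dictionary): key:value pairs represent the
--                                  column and and number that
--                                  represents the quality of the data
--     starting_msg (str): the message to build off that
--                         will ultimately be displayed
--     percent (bool): determines whether the metrics to be displayed
--                     should have a percent sign following their metric
--     :return:
--     starting_msg (str): the message that will display the metrics
--                         regarding data quality
--     """
--     num_errs = len(error_dict)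
--     error_number_in_type = 1
--
--     for table, value in error_dict.items():
--         if num_errs == 1 or (num_errs == 2 and error_number_in_type == 1):
--             starting_msg += " {} ({}% of data)".format(table, value)
--             if num_errs == 1:
--                 starting_msg += "."
--         elif error_number_in_type < num_errs:  # in a series
--             starting_msg += " {} ({}% of data),".format(table, value)
--         else:  # last in a series (2 or more errors total)
--             starting_msg += " and {} ({}% of data).".format(table, value)
--
--         error_number_in_type += 1
--
--     # get rid of the percent if it should display the number of instances
--     if not percent:
--         starting_msg = starting_msg.replace('% of data', '')
--
--     return starting_msg
-- ===== SOURCE B (Python) =====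
-- def print_error_info(error_dict, starting_msg, percent):
--     parts = ["{} ({}% of data)".format(t, v) for t, v in error_dict.items()]
--     if len(parts) == 1:
--         starting_msg += " " + parts[0] + "."
--     elif len(parts) == 2:
--         starting_msg += " " + parts[0] + " and " + parts[1] + "."
--     elif len(parts) >= 3:
--         starting_msg += " " + ", ".join(parts[:-1]) + ", and " + parts[-1] + "."
--     if not percent:
--         starting_msg = starting_msg.replace('% of data', '')
--     return starting_msg
-- ===== Notes on version B (the rewrite author's own statement) =====
-- stated objective: simpler
-- what changed: Replaces A's running item counter and per-item position branch chain with building the formatted parts list once and selecting one of three joining forms (nothing / ' p.' / ' p and q.' / comma-join with Oxford 'and') from the list's length.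
import Mathlib
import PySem

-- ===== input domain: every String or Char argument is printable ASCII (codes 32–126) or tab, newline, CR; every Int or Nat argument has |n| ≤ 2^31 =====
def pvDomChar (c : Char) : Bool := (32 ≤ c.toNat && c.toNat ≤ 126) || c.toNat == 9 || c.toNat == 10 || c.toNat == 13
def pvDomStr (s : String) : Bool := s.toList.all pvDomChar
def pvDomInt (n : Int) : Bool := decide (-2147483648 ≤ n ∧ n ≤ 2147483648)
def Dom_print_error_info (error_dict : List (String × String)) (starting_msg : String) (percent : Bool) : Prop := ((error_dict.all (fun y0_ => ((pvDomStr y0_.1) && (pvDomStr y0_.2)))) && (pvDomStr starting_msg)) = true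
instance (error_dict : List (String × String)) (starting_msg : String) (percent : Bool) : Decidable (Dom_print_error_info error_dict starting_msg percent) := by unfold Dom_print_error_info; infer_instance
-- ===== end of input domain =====

-- B replaces A's running item counter and per-position branch chain by building the formatted
-- parts list once and choosing one of three joining forms from its length (objective: simpler).
-- The dict parameter is modelled as PySem.Dict.ofList of the association list (Python dict semantics).

-- ===== PORT A =====
-- " {} ({}% of data)".format(table, value)
def pvFmtA (t v : List Char) : List Char :=
  " ".toList ++ t ++ " (".toList ++ v ++ "% of data)".toList

-- A's for-loop: n = num_errs, i = error_number_in_type, msg = starting_msg so far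
def pvLoopA (n : Nat) : Nat → List Char → List (List Char × List Char) → List Char
  | _, msg, [] => msg
  | i, msg, x :: rest =>
    pvLoopA n (i + 1)
      (if n = 1 ∨ (n = 2 ∧ i = 1) then
        (if n = 1 then msg ++ pvFmtA x.1 x.2 ++ ".".toList else msg ++ pvFmtA x.1 x.2)
      else if i < n then msg ++ pvFmtA x.1 x.2 ++ ",".toList
      else msg ++ " and ".toList ++ x.1 ++ " (".toList ++ x.2 ++ "% of data).".toList)
      rest

def print_error_info (error_dict : List (String × String)) (starting_msg : String) (percent : Bool) : String :=
  let items := (PySem.Dict.ofList error_dict).items.map (fun p => (p.1.toList, p.2.toList))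
  let s := String.ofList (pvLoopA items.length 1 starting_msg.toList items)
  if percent then s else PySem.Str.replace s "% of data" ""

-- ===== PORT B =====
-- "{} ({}% of data)".format(t, v)
def pvPartB (t v : List Char) : List Char :=
  t ++ " (".toList ++ v ++ "% of data)".toList

-- the length-based branch of Source B: nothing / " p." / " p and q." / " p1, …, and pk."
def pvOutB (msg : List Char) : List (List Char) → List Char
  | [] => msg
  | [p] => msg ++ " ".toList ++ p ++ ".".toList
  | [p, q] => msg ++ " ".toList ++ p ++ " and ".toList ++ q ++ ".".toList
  | ps => msg ++ " ".toList ++ PySem.Chars.join ", ".toList ps.dropLast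
            ++ ", and ".toList ++ ps.getLastD [] ++ ".".toList

def print_error_info_alt (error_dict : List (String × String)) (starting_msg : String) (percent : Bool) : String :=
  let parts := (PySem.Dict.ofList error_dict).items.map (fun p => pvPartB p.1.toList p.2.toList)
  let s := String.ofList (pvOutB starting_msg.toList parts)
  if percent then s else PySem.Str.replace s "% of data" ""

-- ===== PRECONDITION & SPEC =====
def Spec_print_error_info (error_dict : List (String × String)) (starting_msg : String) (percent : Bool) (out : String) : Prop := out = print_error_info_alt error_dict starting_msg percent
instance (error_dict : List (String × String)) (starting_msg : String) (percent : Bool) (out : String) : Decidable (Spec_print_error_info error_dict starting_msg percent out) := by unfold Spec_print_error_info; infer_instance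

-- ===== CLAIM (what is proved, stated in full; the proofs are below) =====
def Claim_equal_print_error_info : Prop := ∀ (error_dict : List (String × String)) (starting_msg : String) (percent : Bool), Dom_print_error_info error_dict starting_msg percent → Spec_print_error_info error_dict starting_msg percent (print_error_info error_dict starting_msg percent)

-- ===== LEMMAS AND PROOFS =====

-- splitting the composite string literals into the atoms shared by both ports
theorem pvLit1 : ", and ".toList = ",".toList ++ " and ".toList := by decide
theorem pvLit2 : "% of data).".toList = "% of data)".toList ++ ".".toList := by decide
theorem pvLit3 : ", ".toList = ",".toList ++ " ".toList := by decide

-- what A's loop appends over a whole list of ≥ 3 items (every position gets the comma form,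
-- except the last, which gets the " and …." form)
def pvTail : List (List Char × List Char) → List Char
  | [] => []
  | [x] => " and ".toList ++ x.1 ++ " (".toList ++ x.2 ++ "% of data).".toList
  | x :: rest => pvFmtA x.1 x.2 ++ ",".toList ++ pvTail rest

-- one-step unfoldings of A's loop, used by the proofs below
theorem pvLoopA_nil (n i : Nat) (msg : List Char) : pvLoopA n i msg [] = msg := rfl

theorem pvLoopA_cons (n i : Nat) (msg : List Char) (x : List Char × List Char)
    (rest : List (List Char × List Char)) :
    pvLoopA n i msg (x :: rest) =
      pvLoopA n (i + 1)
        (if n = 1 ∨ (n = 2 ∧ i = 1) then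
          (if n = 1 then msg ++ pvFmtA x.1 x.2 ++ ".".toList else msg ++ pvFmtA x.1 x.2)
        else if i < n then msg ++ pvFmtA x.1 x.2 ++ ",".toList
        else msg ++ " and ".toList ++ x.1 ++ " (".toList ++ x.2 ++ "% of data).".toList)
        rest := rfl

theorem pvLoopA_ge3 (l : List (List Char × List Char)) :
    ∀ (n i : Nat) (msg : List Char), 3 ≤ n → i + l.length = n + 1 → l ≠ [] →
    pvLoopA n i msg l = msg ++ pvTail l := by
  induction l with
  | nil => intro n i msg _ _ h; exact absurd rfl h
  | cons x rest ih =>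
    intro n i msg h3 hlen _
    cases rest with
    | nil =>
      simp only [List.length] at hlen
      have h1 : ¬ (n = 1 ∨ (n = 2 ∧ i = 1)) := by omega
      have h2 : ¬ i < n := by omega
      rw [pvLoopA_cons, if_neg h1, if_neg h2, pvLoopA_nil]
      simp [pvTail, List.append_assoc]
    | cons y rs =>
      simp only [List.length] at hlen
      have h1 : ¬ (n = 1 ∨ (n = 2 ∧ i = 1)) := by omega
      have h2 : i < n := by omega
      rw [pvLoopA_cons, if_neg h1, if_pos h2,
        ih n (i + 1) _ h3 (by simp; omega) (by simp)]
      have hT : pvTail (x :: y :: rs) = pvFmtA x.1 x.2 ++ ",".toList ++ pvTail (y :: rs) := rfl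
      rw [hT]
      simp [List.append_assoc]

theorem pvJoinB_tail : ∀ (l : List (List Char × List Char)), 2 ≤ l.length →
    " ".toList ++ PySem.Chars.join ", ".toList ((l.map (fun p => pvPartB p.1 p.2)).dropLast)
      ++ ", and ".toList ++ (l.map (fun p => pvPartB p.1 p.2)).getLastD [] ++ ".".toList
    = pvTail l
  | [], h => by simp at h
  | [x], h => by simp at h
  | [x, y], _ => by
      simp [List.map, List.dropLast, List.getLastD, PySem.Chars.join_singleton,
        pvTail, pvFmtA, pvPartB, pvLit1, pvLit2, List.append_assoc]
  | x :: y :: z :: r, _ => by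
      have ih := pvJoinB_tail (y :: z :: r) (by simp)
      have hT : pvTail (x :: y :: z :: r) = pvFmtA x.1 x.2 ++ ",".toList ++ pvTail (y :: z :: r) := rfl
      rw [hT, ← ih]
      simp [List.map, List.dropLast, PySem.Chars.join_cons_cons,
        pvFmtA, pvPartB, pvLit1, pvLit3, List.append_assoc]

theorem pvCore (items : List (List Char × List Char)) (msg : List Char) :
    pvLoopA items.length 1 msg items
      = pvOutB msg (items.map (fun p => pvPartB p.1 p.2)) := by
  match items with
  | [] => rfl
  | [x] =>
      simp [pvLoopA, pvOutB, pvFmtA, pvPartB, List.append_assoc]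
  | [x, y] =>
      simp [pvLoopA, pvOutB, pvFmtA, pvPartB, pvLit2, List.append_assoc]
  | x :: y :: z :: r =>
      rw [pvLoopA_ge3 (x :: y :: z :: r) (x :: y :: z :: r).length 1 msg
            (by simp) (by omega) (by simp),
        ← pvJoinB_tail (x :: y :: z :: r) (by simp)]
      simp [pvOutB, List.map, List.append_assoc]

-- ===== VERDICT (by name: the statement is the Claim_ definition above) =====
theorem print_error_info_spec : Claim_equal_print_error_info := by
  intro error_dict starting_msg percent _
  unfold Spec_print_error_info print_error_info print_error_info_alt
  simp only []
  rw [pvCore, List.map_map]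
  rfl
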